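-- pv_equiv track=rewrite | github.com/TobyCourtis/algo-a-day-keeps-the-doctor-away | hackerrank/mock_assessment/qrt/2.py | minFriends
-- ===== SOURCE A (Python) =====
-- def minFriends(numNodes, numEdges):
--     # think of the graph as a straight line of nodes
--     # given we have to use all edges, what is the largest minimal size connected group we can make
--     # for sample case 2, a connected group of size 2 exists but we have to make a group of size 3 by using all edges, hence output = 3
--
--     # algorithm that should work:
--     # 1. define all nodes with edgeCount = 0
--     # 2. connect lowest edgeCount node to second lowest edge count node (+1 to both node's edgeCount)
--     # 3. repeat step 2 until all edges are used
--     # 4. find largest connected graph created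
--     if numNodes == 1:
--         return 1
--
--     nodes = [0] * numNodes
--
--     for i in range(numEdges):
--         min_node = nodes.index(min(nodes))
--         nodes[min_node] += 1
--         next_min_node = nodes.index(min(nodes))
--         nodes[next_min_node] += 1
--
--     return max(nodes)
-- ===== SOURCE B (Python) =====
-- def minFriends(numNodes, numEdges):
--     # Balanced greedy distribution of 2*numEdges endpoint increments over
--     # numNodes nodes makes the maximum degree ceil(2*numEdges/numNodes).
--     if numNodes == 1:
--         return 1
--     return -(-2 * numEdges // numNodes)
-- ===== Notes on version B (the rewrite author's own statement) =====
-- stated objective: faster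
-- what changed: Replaces the greedy simulation (repeatedly scanning the node list for minima over numEdges rounds) with the closed form ceil(2*numEdges/numNodes), since balanced greedy distribution keeps all degrees within 1 of each other.
-- outside the precondition, e.g. on minFriends(2, -1): A returns 0, B returns -1
import Mathlib
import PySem

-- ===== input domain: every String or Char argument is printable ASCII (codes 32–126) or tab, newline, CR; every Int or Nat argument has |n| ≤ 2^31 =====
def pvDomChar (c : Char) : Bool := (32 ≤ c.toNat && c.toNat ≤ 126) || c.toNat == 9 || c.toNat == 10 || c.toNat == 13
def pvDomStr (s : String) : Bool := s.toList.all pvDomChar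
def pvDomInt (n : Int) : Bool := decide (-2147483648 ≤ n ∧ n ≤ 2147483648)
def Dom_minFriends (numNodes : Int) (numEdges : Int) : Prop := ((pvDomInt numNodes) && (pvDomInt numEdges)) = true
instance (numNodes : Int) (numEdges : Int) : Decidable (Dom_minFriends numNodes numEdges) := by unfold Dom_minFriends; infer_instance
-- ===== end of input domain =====

-- B replaces A's O(numEdges*numNodes) greedy min-scanning simulation by the closed form
-- ceil(2*numEdges/numNodes) (objective: faster, asymptotic).


-- ===== PORT A =====
-- one iteration of A's loop body: increment the first minimum, then the next first minimum.
-- the `none` branches are unreachable on nonempty lists (Python's min/index would raise there).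
def minFriendsStep (nodes : List Int) : List Int :=
  match PySem.List.min? nodes (fun x => x) with
  | none => nodes
  | some m =>
    match PySem.List.index? nodes m with
    | none => nodes
    | some i =>
      let nodes1 := nodes.set i (m + 1)
      match PySem.List.min? nodes1 (fun x => x) with
      | none => nodes1
      | some m2 =>
        match PySem.List.index? nodes1 m2 with
        | none => nodes1
        | some j => nodes1.set j (m2 + 1)

def minFriends (numNodes : Int) (numEdges : Int) : Int :=
  if numNodes = 1 then 1
  else
    let nodes := List.replicate numNodes.toNat (0 : Int)
    let nodes := (List.range numEdges.toNat).foldl (fun l _ => minFriendsStep l) nodes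
    -- max([]) raises ValueError in Python; unreachable under Pre_
    (PySem.List.max? nodes (fun x => x)).getD 0

-- ===== PORT B =====
def minFriends_alt (numNodes : Int) (numEdges : Int) : Int :=
  if numNodes = 1 then 1
  else -(PySem.Int.floordiv (-(2 * numEdges)) numNodes)

-- ===== PRECONDITION & SPEC =====
-- Pre_ excludes numNodes ≤ 0, where A raises ValueError (min/max of an empty list), and
-- negative numEdges, which lies outside the natural domain of an edge count (A happens to
-- return 0 there, while ceiling division is negative).
def Pre_minFriends (numNodes : Int) (numEdges : Int) : Prop := 1 ≤ numNodes ∧ 0 ≤ numEdges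
instance (numNodes : Int) (numEdges : Int) : Decidable (Pre_minFriends numNodes numEdges) := by unfold Pre_minFriends; infer_instance
def pvWitness_minFriends : Int × Int := (3, 4)

def Spec_minFriends (numNodes : Int) (numEdges : Int) (out : Int) : Prop := out = minFriends_alt numNodes numEdges
instance (numNodes : Int) (numEdges : Int) (out : Int) : Decidable (Spec_minFriends numNodes numEdges out) := by unfold Spec_minFriends; infer_instance

-- ===== CLAIM (what is proved, stated in full; the proofs are below) =====
def Claim_equal_minFriends : Prop := ∀ (numNodes : Int) (numEdges : Int), Dom_minFriends numNodes numEdges → Pre_minFriends numNodes numEdges → Spec_minFriends numNodes numEdges (minFriends numNodes numEdges)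

-- ===== LEMMAS AND PROOFS =====

-- invariant of A's loop: all degrees are q or q+1, exactly r of them are q+1
def MFInv (n : Nat) (q : Int) (r : Nat) (l : List Int) : Prop :=
  l.length = n ∧ r < n ∧ (∀ x ∈ l, x = q ∨ x = q + 1) ∧ l.count (q + 1) = r

theorem count_set_of_ne {l : List Int} {i : Nat} {v : Int}
    (h : i < l.length) (hne : l[i] ≠ v) : (l.set i v).count v = l.count v + 1 := by
  induction l generalizing i with
  | nil => simp at h
  | cons a t ih =>
    cases i with
    | zero =>
      simp only [List.getElem_cons_zero] at hne
      simp [hne]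
    | succ i =>
      simp only [List.length_cons, Nat.add_lt_add_iff_right] at h
      simp only [List.getElem_cons_succ] at hne
      simp only [List.set_cons_succ, List.count_cons, ih h hne]
      split_ifs <;> omega

-- if not all n slots already hold q+1, the common value q is still present
theorem mf_q_mem {n : Nat} {q : Int} {r : Nat} {l : List Int}
    (hlen : l.length = n) (hall : ∀ x ∈ l, x = q ∨ x = q + 1)
    (hcnt : l.count (q + 1) = r) (hlt : r < n) : q ∈ l := by
  by_contra hq
  have hall1 : ∀ b ∈ l, q + 1 = b := by
    intro x hx
    rcases hall x hx with h | h
    · exact absurd (h ▸ hx) hq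
    · exact h.symm
  have := List.count_eq_length.mpr hall1
  omega

-- the first minimum the scan finds is q when q is present and everything is q or q+1
theorem mf_min_eq {q : Int} {l : List Int} (hne : l ≠ []) (hqmem : q ∈ l)
    (hall : ∀ x ∈ l, x = q ∨ x = q + 1) :
    PySem.List.min? l (fun x => x) = some q := by
  cases hM : PySem.List.min? l (fun x => x) with
  | none => exact absurd ((PySem.List.min?_eq_none_iff _ _).mp hM) hne
  | some m =>
    have hmmem := PySem.List.min?_mem hM
    have hmmin : m ≤ q := PySem.List.min?_isMin hM q hqmem
    rcases hall m hmmem with h | h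
    · rw [h]
    · omega

theorem minFriendsStep_inv {n : Nat} {q : Int} {r : Nat} {l : List Int}
    (hn : 2 ≤ n) (hinv : MFInv n q r l) :
    ∃ q' r', MFInv n q' r' (minFriendsStep l) ∧ q' * n + r' = q * n + r + 2 := by
  obtain ⟨hlen, hrn, hall, hcnt⟩ := hinv
  have hne : l ≠ [] := by intro h; subst h; simp at hlen; omega
  have hqmem : q ∈ l := mf_q_mem hlen hall hcnt hrn
  have hmin : PySem.List.min? l (fun x => x) = some q := mf_min_eq hne hqmem hall
  obtain ⟨i, hi⟩ := Option.isSome_iff_exists.mp ((PySem.List.index?_isSome_iff _ _).mpr hqmem)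
  obtain ⟨hilt, hgi, -⟩ := PySem.List.getElem_of_index?_eq_some hi
  set l1 := l.set i (q + 1) with hl1
  have hlen1 : l1.length = n := by simp [hl1, hlen]
  have hne1 : l1 ≠ [] := List.ne_nil_of_length_pos (by omega)
  have hall1 : ∀ x ∈ l1, x = q ∨ x = q + 1 := by
    intro x hx
    rcases List.mem_or_eq_of_mem_set hx with h | h
    · exact hall x h
    · right; exact h
  have hcnt1 : l1.count (q + 1) = r + 1 := by
    rw [hl1, count_set_of_ne hilt (by rw [hgi]; omega), hcnt]
  by_cases hcase : r + 1 < n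
  · -- a second copy of q is still around: the next minimum is q again
    have hqmem1 : q ∈ l1 := mf_q_mem hlen1 hall1 hcnt1 hcase
    have hmin1 : PySem.List.min? l1 (fun x => x) = some q := mf_min_eq hne1 hqmem1 hall1
    obtain ⟨j, hj⟩ := Option.isSome_iff_exists.mp ((PySem.List.index?_isSome_iff _ _).mpr hqmem1)
    obtain ⟨hjlt, hgj, -⟩ := PySem.List.getElem_of_index?_eq_some hj
    have hstep : minFriendsStep l = l1.set j (q + 1) := by
      simp only [minFriendsStep, hmin, hi, ← hl1, hmin1, hj]
    set l2 := l1.set j (q + 1) with hl2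
    have hlen2 : l2.length = n := by simp [hl2, hlen1]
    have hall2 : ∀ x ∈ l2, x = q ∨ x = q + 1 := by
      intro x hx
      rcases List.mem_or_eq_of_mem_set hx with h | h
      · exact hall1 x h
      · right; exact h
    have hcnt2 : l2.count (q + 1) = r + 2 := by
      rw [hl2, count_set_of_ne hjlt (by rw [hgj]; omega), hcnt1]
    by_cases hfull : r + 2 < n
    · exact ⟨q, r + 2, by rw [hstep]; exact ⟨hlen2, hfull, hall2, hcnt2⟩, by push_cast; ring⟩
    · -- r + 2 = n : every slot now holds q + 1
      have hn' : r + 2 = n := by omega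
      have hfull2 : ∀ b ∈ l2, q + 1 = b := by
        rw [← List.count_eq_length]; omega
      refine ⟨q + 1, 0, ?_, ?_⟩
      · rw [hstep]
        refine ⟨hlen2, by omega, fun x hx => Or.inl (hfull2 x hx).symm, ?_⟩
        rw [List.count_eq_zero]
        intro h
        have := hfull2 _ h
        omega
      · have hcast : ((r : Int) + 2) = n := by exact_mod_cast hn'
        have hq : (q + 1) * (n : Int) = q * n + n := by ring
        push_cast
        linarith [hq, hcast]
  · -- r + 1 = n : l1 is all q + 1, the next minimum is q + 1
    have hn1 : r + 1 = n := by omega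
    have hfull1 : ∀ b ∈ l1, q + 1 = b := by
      rw [← List.count_eq_length]; omega
    have hqmem1 : q + 1 ∈ l1 := List.count_pos_iff.mp (by omega)
    have hmin1 : PySem.List.min? l1 (fun x => x) = some (q + 1) :=
      mf_min_eq hne1 hqmem1 (fun x hx => Or.inl (hfull1 x hx).symm)
    obtain ⟨j, hj⟩ := Option.isSome_iff_exists.mp ((PySem.List.index?_isSome_iff _ _).mpr hqmem1)
    obtain ⟨hjlt, hgj, -⟩ := PySem.List.getElem_of_index?_eq_some hj
    have hstep : minFriendsStep l = l1.set j (q + 1 + 1) := by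
      simp only [minFriendsStep, hmin, hi, ← hl1, hmin1, hj]
    set l2 := l1.set j (q + 1 + 1) with hl2
    have hlen2 : l2.length = n := by simp [hl2, hlen1]
    refine ⟨q + 1, 1, ?_, ?_⟩
    · rw [hstep]
      refine ⟨hlen2, by omega, ?_, ?_⟩
      · intro x hx
        rcases List.mem_or_eq_of_mem_set hx with h | h
        · left; exact (hfull1 x h).symm
        · right; exact h
      · rw [hl2, count_set_of_ne hjlt (by rw [hgj]; omega)]
        rw [List.count_eq_zero.mpr]
        · intro h
          have := hfull1 _ h
          omega
    · have hcast : ((r : Int) + 1) = n := by exact_mod_cast hn1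
      have hq : (q + 1) * (n : Int) = q * n + n := by ring
      push_cast
      linarith [hq, hcast]

theorem minFriends_loop_inv (n : Nat) (hn : 2 ≤ n) (k : Nat) :
    ∃ q r, MFInv n q r ((List.range k).foldl (fun l _ => minFriendsStep l)
      (List.replicate n (0 : Int))) ∧ q * n + r = 2 * k := by
  induction k with
  | zero =>
    refine ⟨0, 0, ⟨by simp, by omega, ?_, ?_⟩, by ring⟩
    · intro x hx; left; exact (List.eq_of_mem_replicate hx)
    · rw [List.count_eq_zero]
      intro h; exact absurd (List.eq_of_mem_replicate h) (by norm_num)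
  | succ k ih =>
    obtain ⟨q, r, hinv, hsum⟩ := ih
    rw [List.range_succ, List.foldl_append]
    obtain ⟨q', r', hinv', hsum'⟩ := minFriendsStep_inv hn hinv
    exact ⟨q', r', hinv', by push_cast at hsum' ⊢; omega⟩

theorem mfinv_max {n : Nat} {q : Int} {r : Nat} {l : List Int}
    (hn : 2 ≤ n) (hinv : MFInv n q r l) :
    (PySem.List.max? l (fun x => x)).getD 0 = if r = 0 then q else q + 1 := by
  obtain ⟨hlen, hrn, hall, hcnt⟩ := hinv
  have hne : l ≠ [] := by intro h; subst h; simp at hlen; omega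
  cases hM : PySem.List.max? l (fun x => x) with
  | none => exact absurd ((PySem.List.max?_eq_none_iff _ _).mp hM) hne
  | some M =>
    have hMmem := PySem.List.max?_mem hM
    have hMmax := PySem.List.max?_isMax hM
    simp only [Option.getD_some]
    by_cases hr0 : r = 0
    · rw [if_pos hr0]
      have hnot : (q + 1) ∉ l := by rw [← List.count_eq_zero, hcnt, hr0]
      rcases hall M hMmem with h | h
      · exact h
      · exact absurd (h ▸ hMmem) hnot
    · rw [if_neg hr0]
      have hmem : (q + 1) ∈ l := List.count_pos_iff.mp (by omega)
      have hle : q + 1 ≤ M := hMmax (q + 1) hmem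
      rcases hall M hMmem with h | h
      · omega
      · exact h

-- ===== VERDICT (by name: the statement is the Claim_ definition above) =====
theorem minFriends_spec : Claim_equal_minFriends := by
  intro numNodes numEdges _ hpre
  obtain ⟨h1, h2⟩ := hpre
  unfold Spec_minFriends minFriends minFriends_alt
  by_cases hone : numNodes = 1
  · simp [hone]
  · simp only [if_neg hone]
    have hn2 : (2 : Int) ≤ numNodes := by omega
    have hn : 2 ≤ numNodes.toNat := by omega
    obtain ⟨q, r, hinv, hsum⟩ := minFriends_loop_inv numNodes.toNat hn numEdges.toNat
    rw [mfinv_max hn hinv]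
    have hcast : (numNodes.toNat : Int) = numNodes := Int.toNat_of_nonneg (by omega)
    have hcast2 : (numEdges.toNat : Int) = numEdges := Int.toNat_of_nonneg h2
    rw [hcast, hcast2] at hsum
    have hr : (r : Int) < numNodes := by
      have := hinv.2.1; omega
    rw [eq_comm]
    rw [PySem.Int.neg_floordiv_neg_eq_iff_of_pos (by omega)]
    by_cases hr0 : r = 0
    · rw [if_pos hr0]
      subst hr0
      push_cast at hsum
      constructor <;> nlinarith [hn2]
    · rw [if_neg hr0]
      have : 1 ≤ (r : Int) := by exact_mod_cast Nat.one_le_iff_ne_zero.mpr hr0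
      constructor <;> nlinarith [hn2]
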